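/- GENERATED by mk_final_copies.py from the proof of the farm's unit `start_decoder.C8c` (farm:start_decoder.C8c.1: Proof.lean) as the
   re-elaboration sweep compiled it — do not edit. -/
/-
  PROOF of the unit `start_decoder.C8c` (0x114a47–0x114a87 + the stub 0x114ae0–0x114af2; stb_vorbis_fixed.c 3857–3858; 20 instructions):
  `At8M2` (cut139, the second `setup_malloc(f, 4·(SE+1))` returned) → `At8M3` (cut140, the FIX 7 memset returned) ∨ `AtERR` (cut4).

      0x114a47  mov rbp,rax ; lea rdi,[r14+838H] ; call __asan_store8 ; mov [r14+838H],rbp      c->sorted_values = rax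
      0x114a5d  test rbp,rbp ; je 0x114ae0                                                      NULL → the stub
      0x114a62  check load4 c+840H ; eax = SE ; rdx = sext(eax+1)·4 ; esi = 0 ; rdi = rbp ; call memset → cut140
      0x114ae0  rbp = [rsp+18H] = f ; esi = 3 ; rdi = rbp ; call error ; jmp 0x113b22 = cut4

  ONE walk; the two exits are the pure lemmas `build_m3` / `build_err` of Lemmas.lean (the carry layer `MInv.step` over ONE footprint
  from the cut point: the stack below `R`, the word `c->sorted_values`, and the new block resp. `f->error`).
-/
import Asan.CheckWalk
import Vorbis.Spec.Units.start_decoder_C8c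
import Vorbis.Spec.StartDecoderCarry
import Vorbis.Spec.StartDecoderC3
import Vorbis.Spec.StartDecoderATest
import Vorbis.Spec.Worked.start_decoder_C8c_Lemmas

open X86 X86.User Asan Vorbis Vorbis.Spec Vorbis.Spec.StartDecoder

set_option maxRecDepth 100000
set_option maxHeartbeats 4000000

namespace Vorbis.Spec.start_decoder_C8c

/-- Segment C8c, walked: the store of `c->sorted_values` with its check, the NULL test; on NULL the stub `error(f, 3)` and the jump to
the epilogue (`build_err`); otherwise the check and load of `c->sorted_entries`, `memset(p, 0, 4·(SE+1))` whose precondition is the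
liveness of the block allocated since `Ac`, and its return at cut140 (`build_m3`). -/
theorem c8c_walk : Vorbis.Spec.start_decoder_C8c.Statement := by
  intro Lay hLay μ hμ u₀ hcode h_load4 h_store8 h_memset h_error
  intro g i v hat
  obtain ⟨A, lengths, values, A2, A3, Ai, Aw, Ab, Ac, h, hextc, hextc', hsc, hsv0, hres⟩ := hat
  -- 1. the entry state's facts, from the `AtEntry` the assertion carries
  have hfr := h.frame
  have hcur := h.core.cur
  have hhand := hcur.hand
  have he := hfr.entry
  v_entry he
  simp only [depth] at he_room he_stack
  -- 2. the present state: rip, the code span, DF / MXCSR; rsp and r14 stay ATOMS of the walk (`hR`, `h14` give their numbers)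
  have w_rip := hfr.rip
  have c_rsp := hfr.rsp
  have w_eq : Mem.EqOn Vorbis.L.textLo Vorbis.L.textHi u₀.mem v.mem := hfr.code
  have hdf : v.flags .df = false := (show abiInv _ from hfr.inv).1
  have hmx : v.mxcsr &&& 0x1F80 = 0x1F80 := (show abiInv _ from hfr.inv).2
  have hsse := Vorbis.sseOK_of_abiInv hfr.inv
  -- where things are, the memory-dependent part of `Frame` + CUR(i)
  have hpos : Pos g A := Pos.of hfr hcur
  have hm0 : MInv g i A2 A3 Ai A v.mem := MInv.of hfr hcur
  have hcw := hm0.c_where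
  have htx : 0x119d40 ≤ A.1.B := hhand.arenaText
  have hk1 := h.core.k1
  have hk2 := h.core.k2
  have c_r14 := hcur.r14
  have hshad := hfr.shadow
  have hoffT := hfr.offText
  obtain ⟨c, hc⟩ : ∃ c, g.cb v.mem i = c := ⟨_, rfl⟩
  rw [hc] at hcw hk1 hk2 c_r14 hres
  have h14 : (v.reg .r14).toNat = c := by
    rw [c_r14]
    exact toNat_addr _ (by omega)
  have hR : (v.reg .rsp).toNat = g.R := by
    have h2 := hpos.ra_hi
    have h1 := hpos.r_eq
    rw [c_rsp, toNat_addr _ (by omega)]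
  have hRsp : (v.reg .rsp).toNat + 1480 = (g.e.reg .rsp).toNat := by
    have h1 := hpos.r_eq
    simp only [Ghost.RA] at h1
    omega
  have hms := h_memset A.2 g.frames'
  have her := h_error A.2 g.frames'
  -- 3. the loads of the segment: `c->sorted_entries` (0x114a6e), the spill of `f` at `[rsp+18H]` (0x114ae0)
  have hse24 : (Codebook.sorted_entries v.mem c).toNat < 2 ^ 24 := by
    have := hk1.ent_lt
    have := hk2.se_le
    omega
  have r_se : v.mem.readLE (v.reg .r14 + 2112) 4 = (Codebook.sorted_entries v.mem c).toNat := by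
    have ee : Codebook.sorted_entries v.mem c = sint32 (v.mem.readLE (v.reg .r14 + 2112) 4) := by
      rw [c_r14]
      simp only [vacc, voff, Mem.i32, Mem.u32, addr_add_lit]
    have hcs := sint32_cases (v.mem.readLE (v.reg .r14 + 2112) 4)
    have hn := hk2.se_nonneg
    rw [ee] at hn ⊢
    rcases hcs with ⟨_, h2⟩ | ⟨h1, h2⟩
    · rw [h2]
      exact (Int.toNat_natCast _).symm
    · have hlt : v.mem.readLE (v.reg .r14 + 2112) 4 < 256 ^ 4 := Mem.readLE_lt' v.mem _ 4
      rw [h2] at hn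
      omega
  have r_f : v.mem.readLE (v.reg .rsp + 24) 8 = g.f := by
    have := hcur.slot_f
    rw [c_rsp]
    simp only [vfield]
    exact this
  clear c_rsp c_r14
  obtain ⟨p1, p2, p3, p4, p5, p6, p7, p8, p9, p10, p11, p12, p13, p14⟩ := hpos
  u_walk hcode [hμ.vendor] until [Vorbis.L.start_decoder.cut140, Vorbis.L.start_decoder.cut4] span [Vorbis.L.textLo, Vorbis.L.textHi] side (v_side)
  case check_114a51 =>
    -- 0x114a51, line 3857: the store8 check of `&c->sorted_values` = c + 838H, inside the struct `cb(i)`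
    have hun : ShadowUntouched v.mem s_114a51.mem := by v_untouched
    have hs := C7.cb_site hcur 2104 8 (by omega) (by omega)
    rw [hc] at hs
    exact Vorbis.Spec.check_site hshad hun hs (by u_omega)
  case check_114a69 =>
    -- 0x114a69, line 3858: the load4 check of `&c->sorted_entries` = c + 840H, inside the struct `cb(i)`
    have hun : ShadowUntouched v.mem s_114a69.mem := by v_untouched
    have hs := C7.cb_site hcur 2112 4 (by omega) (by omega)
    rw [hc] at hs
    exact Vorbis.Spec.check_site hshad hun hs (by u_omega)
  case call_inv => v_inv
  case call_inv => v_inv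
  case pre_114aed =>
    -- 0x114aed, line 3858: `error(f, VORBIS_outofmem)`: the shadow layer at the callee's entry, `*f` inside one live object
    have hun : ShadowUntouched v.mem s_114aed.mem := by v_untouched
    have e : (s_114aed.reg .rsp).toNat + 8 = g.R := by
      rw [w_rsp]
      u_omega
    have erdi : (s_114aed.reg .rdi).toNat = g.f := by
      rw [w_rdi]
      exact toNat_addr _ (by omega)
    refine ⟨⟨?_, hoffT⟩, ?_⟩
    · rw [e]
      exact hshad.untouched hun
    · rw [erdi]
      exact (readerEnv hhand hcur.sd.env.live).obj
  case pre_114a87 =>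
    -- 0x114a87, line 3858 (FIX 7): `memset(p, 0, 4·(SE+1))`: `p ≠ NULL` is the block allocated since `Ac`, a live object
    have hun : ShadowUntouched v.mem s_114a87.mem := by v_untouched
    have e : (s_114a87.reg .rsp).toNat + 8 = g.R := by
      rw [w_rsp]
      u_omega
    have hnz : ¬ v.reg .rax = 0 := by
      intro h0
      apply hbr_114a60
      rw [h0]
      rfl
    have hsv := hres.resolve_left hnz
    have erdx : (s_114a87.reg .rdx).toNat = 4 * ((Codebook.sorted_entries v.mem c).toNat + 1) := by
      rw [w_rdx]
      exact rdx_size _ hse24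
    have erdi : (s_114a87.reg .rdi).toNat = (v.reg .rax).toNat := by
      rw [w_rdi]
    refine ⟨⟨?_, hoffT⟩, Or.inr ?_⟩
    · rw [e]
      exact hshad.untouched hun
    · rw [erdi, erdx]
      have hblk : A.1.Block (v.reg .rax).toNat (4 * ((Codebook.sorted_entries v.mem c).toNat + 1)) := hsv.1
      exact ⟨⟨_, _, .setup⟩, List.mem_append_right _ (hcur.sd.arena.AR6 _ hblk.obj_mem), Nat.le_refl _, Nat.le_refl _⟩
  case cont =>
    -- 0x114af2: `error(f, VORBIS_outofmem)` returned
    obtain ⟨hrax0, hunp, _⟩ := w_post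
    have hun0 : ShadowUntouched v.mem s_114aed.mem := by v_untouched
    have erdi : (s_114aed.reg .rdi).toNat = g.f := by
      rw [w_rdi_114aed]
      exact toNat_addr _ (by omega)
    v_after_call w_rsp_114aed w_mem_114aed
    rw [erdi] at w_same
    have hall : Mem.SameExcept [⟨(v.reg .rsp).toNat - 408, (v.reg .rsp).toNat⟩,
        ⟨(v.reg .r14).toNat + 2104, (v.reg .r14).toNat + 2112⟩, ⟨g.f + 140, g.f + 144⟩]
        v.mem s_114aedr.mem := by
      u_same
    rw [hR, h14] at hall
    have hunAll : ShadowUntouched v.mem s_114aedr.mem := Mem.EqOn.trans hun0 hunp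
    have k_rsp := w_rsp
    have k_r14 := w_kept.get .r14 rfl
    have w_rax := hrax0
    clear w_same
    u_walk hcode [hμ.vendor] until [Vorbis.L.start_decoder.cut4] span [Vorbis.L.textLo, Vorbis.L.textHi] side (v_side)
    -- 0x113b22 = cut4: the epilogue, eax = 0
    have hinv : abiInv s_114af2 := by
      obtain ⟨h1, h2⟩ := (show abiInv _ from w_inv)
      refine ⟨?_, ?_⟩
      · rw [w_flags]
        exact h1
      · rw [w_mxcsr]
        exact h2
    have hcode' : CodeOK u₀ s_114af2.mem := w_eq
    have hrax : (s_114af2.reg .rax).toNat % 2 ^ 32 = 0 := by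
      rw [w_rax]
      rfl
    rw [← w_mem] at hall hunAll
    rw [← hc] at hall
    refine ReachVia.done (Or.inr ?_)
    have hrsp : s_114af2.reg .rsp = addr g.R := by
      rw [w_rsp]
      exact hfr.rsp
    exact build_err h w_rip hrsp hcode' hinv (w_kept.get .r14 rfl) hall hunAll hrax
  case cont =>
    -- 0x114a8c = cut140: memset returned
    have hnz : ¬ v.reg .rax = 0 := by
      intro h0
      apply hbr_114a60
      rw [h0]
      rfl
    have hsv := hres.resolve_left hnz
    obtain ⟨hrax, hunp, hfill⟩ := w_post
    have hextAiAc : Ai.Extends Ac := (h.core.extw.trans h.core.extb).trans hextc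
    have hyo := young_off_book hm0 (hsv.older hextAiAc)
    rw [hc] at hyo
    simp only [] at hyo
    obtain ⟨⟨hy1, hy2⟩, hy3⟩ := hyo
    have erdx : (s_114a87.reg .rdx).toNat = 4 * ((Codebook.sorted_entries v.mem c).toNat + 1) := by
      rw [w_rdx_114a87]
      exact rdx_size _ hse24
    have hun0 : ShadowUntouched v.mem s_114a87.mem := by v_untouched
    have hp1 : s_114a87.mem.readLE (v.reg .r14 + 2104) 8 = (v.reg .rax).toNat := by
      rw [w_mem_114a87]
      u_read
    v_after_call w_rsp_114a87 w_mem_114a87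
    rw [w_rdi_114a87, erdx] at w_same
    rw [w_mem_114a87] at hp1
    have hp2 : s_114a87r.mem.readLE (v.reg .r14 + 2104) 8 = (v.reg .rax).toNat := by
      u_frame hp1
    -- ONE footprint from the cut point: the pushes, the stored word, memset's windows
    have hall : Mem.SameExcept [⟨(v.reg .rsp).toNat - 408, (v.reg .rsp).toNat⟩,
        ⟨(v.reg .r14).toNat + 2104, (v.reg .r14).toNat + 2112⟩,
        ⟨(v.reg .rax).toNat, (v.reg .rax).toNat + 4 * ((Codebook.sorted_entries v.mem c).toNat + 1)⟩]
        v.mem s_114a87r.mem := by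
      u_same
    rw [hR, h14] at hall
    have hunAll : ShadowUntouched v.mem s_114a87r.mem := Mem.EqOn.trans hun0 hunp
    have k14 : v.reg .r14 = addr c := by
      rw [← hc]
      exact hcur.r14
    have hfield : s_114a87r.mem.u64 (c + 2104) = (v.reg .rax).toNat := by
      unfold Mem.u64
      rw [← Vorbis.addr_add_lit c 2104, ← k14]
      exact hp2
    have hzero : ZeroFill s_114a87r.mem (v.reg .rax).toNat (4 * ((Codebook.sorted_entries v.mem c).toNat + 1)) := by
      intro j hj
      have hj' : j < (s_114a87.reg .rdx).toNat := by
        rw [erdx]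
        exact hj
      have hp := hfill j hj'
      have e0 : (Word.ofBV 0#32).toNat % 256 = 0 := by decide
      rw [w_rdi_114a87, w_rsi_114a87, e0] at hp
      unfold Mem.u8
      rw [← Vorbis.addr_add, Vorbis.addr_toNat]
      exact hp
    apply ReachVia.done
    left
    rw [← hc] at hall hfield hzero hsv
    have hrsp : s_114a87r.reg .rsp = addr g.R := by
      rw [w_rsp]
      exact hfr.rsp
    exact build_m3 h hextc hextc' hsc hsv w_rip hrsp (Vorbis.conv_code_eqOn w_code) w_inv
      (w_kept.get .r14 rfl) (w_kept.get .rbx rfl) (w_kept.get .r12 rfl) hall hunAll hfield hzero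

end Vorbis.Spec.start_decoder_C8c

/-- Unit `start_decoder.C8c`: segment C8c of `start_decoder` takes `At8M2` to `At8M3` or `AtERR`. -/
theorem Vorbis.Spec.Worked.start_decoder_C8c_ok : Vorbis.Spec.start_decoder_C8c.Statement := Vorbis.Spec.start_decoder_C8c.c8c_walk
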